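-- pv_equiv track=rewrite | github.com/larstonder/knowledge-injection-cnn | datasetgenerator/dataprocessing.py | state_to_matrix_set
-- ===== SOURCE A (Python) =====
-- def state_to_matrix_set(state, num):
--
--     matrix = [[set() for x in range(num)] for x in range(num)]
--
--     for i in range(num):
--         for j in range(num):
--             for k in range(num):
--                 if state[i*num*num+j*num+k] == '1':
--                     matrix[i][j].add(k)
--
--     return matrix
-- ===== SOURCE B (Python) =====
-- def state_to_matrix_set(state, num):
--     if num <= 0:
--         return []
--     n2 = num * num
--     cells = [set() for _ in range(n2)]
--     for p in range(num * n2):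
--         if state[p] == '1':
--             cells[p // num].add(p % num)
--     return [cells[r * num:(r + 1) * num] for r in range(num)]
-- ===== Notes on version B (the rewrite author's own statement) =====
-- stated objective: alternative
-- what changed: Replaces the pre-initialized num x num matrix and the three nested loops by a flat list of num*num cell sets filled in one single pass over the linear index (recovering the cell as p//num and the element as p%num), with the rows then regrouped by list slicing.
import Mathlib
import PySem

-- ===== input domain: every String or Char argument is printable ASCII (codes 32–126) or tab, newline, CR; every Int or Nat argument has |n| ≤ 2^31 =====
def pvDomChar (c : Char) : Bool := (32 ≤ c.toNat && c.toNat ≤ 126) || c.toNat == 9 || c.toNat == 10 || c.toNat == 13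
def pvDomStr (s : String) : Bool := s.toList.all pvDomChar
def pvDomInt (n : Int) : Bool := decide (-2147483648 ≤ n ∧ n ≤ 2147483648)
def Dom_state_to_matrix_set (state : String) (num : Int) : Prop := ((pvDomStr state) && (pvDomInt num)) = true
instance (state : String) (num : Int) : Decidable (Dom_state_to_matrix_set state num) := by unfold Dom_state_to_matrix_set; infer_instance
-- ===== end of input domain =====

-- B replaces A's pre-initialized num x num matrix and triple nested loop by a flat list of
-- num*num cell sets filled in ONE pass over the linear index (cell p//num gains p%num), the
-- rows then regrouped by list slicing (objective: alternative; same asymptotic cost).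


-- ===== PORT A =====
-- matrix = [[set() for x in range(num)] for x in range(num)]; then the triple loop
-- mutating matrix[i][j] becomes the triple foldl (mutation = List.modify at i, then j).
def state_to_matrix_set (state : String) (num : Int) : List (List (List Int)) :=
  let matrix : List (List (List Int)) :=
    (PySem.List.pyRange 0 num 1).map (fun _ =>
      (PySem.List.pyRange 0 num 1).map (fun _ => ([] : List Int)))
  (PySem.List.pyRange 0 num 1).foldl (fun m i =>
    (PySem.List.pyRange 0 num 1).foldl (fun m j =>
      (PySem.List.pyRange 0 num 1).foldl (fun m k =>
        if PySem.Str.pyGet? state (i * num * num + j * num + k) = some '1' then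
          m.modify i.toNat (fun row => row.modify j.toNat (fun s => PySem.Set.add s k))
        else m) m) m) matrix

-- ===== PORT B =====
-- if num <= 0: return []
-- n2 = num*num; cells = [set() for _ in range(n2)]
-- for p in range(num*n2): if state[p] == '1': cells[p // num].add(p % num)
-- return [cells[r*num:(r+1)*num] for r in range(num)]
def state_to_matrix_set_alt (state : String) (num : Int) : List (List (List Int)) :=
  if num ≤ 0 then [] else
  let n2 : Int := num * num
  let cells0 : List (List Int) := (PySem.List.pyRange 0 n2 1).map (fun _ => ([] : List Int))
  let cells : List (List Int) :=
    (PySem.List.pyRange 0 (num * n2) 1).foldl (fun cells p =>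
      if PySem.Str.pyGet? state p = some '1' then
        cells.modify (PySem.Int.floordiv p num).toNat
          (fun s => PySem.Set.add s (PySem.Int.mod p num))
      else cells) cells0
  (PySem.List.pyRange 0 num 1).map (fun r =>
    PySem.List.slice cells (some (r * num)) (some ((r + 1) * num)))

-- ===== PRECONDITION & SPEC =====
-- Pre_ excludes exactly the inputs where Python A raises IndexError: num > 0 together with
-- len(state) < num^3 (the largest index A reads is num^3 - 1).
def Pre_state_to_matrix_set (state : String) (num : Int) : Prop :=
  num ≤ 0 ∨ num * num * num ≤ PySem.Str.len state
instance (state : String) (num : Int) : Decidable (Pre_state_to_matrix_set state num) := by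
  unfold Pre_state_to_matrix_set; infer_instance
def pvWitness_state_to_matrix_set : String × Int := ("10011010", 2)

def Spec_state_to_matrix_set (state : String) (num : Int) (out : List (List (List Int))) : Prop := out = state_to_matrix_set_alt state num
instance (state : String) (num : Int) (out : List (List (List Int))) : Decidable (Spec_state_to_matrix_set state num out) := by unfold Spec_state_to_matrix_set; infer_instance

-- ===== CLAIM (what is proved, stated in full; the proofs are below) =====
def Claim_equal_state_to_matrix_set : Prop := ∀ (state : String) (num : Int), Dom_state_to_matrix_set state num → Pre_state_to_matrix_set state num → Spec_state_to_matrix_set state num (state_to_matrix_set state num)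

-- ===== LEMMAS AND PROOFS =====

-- common normal form both ports are reduced to (cell q = cell (i, j) at flat index q = i*n + j)
def pvCellNF (state : String) (num : Int) (q : Nat) : List Int :=
  PySem.Set.ofList (((List.range num.toNat).filter (fun (k : Nat) =>
    decide (PySem.Str.pyGet? state ((q : Int) * num + (k : Int)) = some '1'))).map
    (fun (k : Nat) => (k : Int)))

def pvNF (state : String) (num : Int) : List (List (List Int)) :=
  (List.range num.toNat).map (fun i =>
    (List.range num.toNat).map (fun j => pvCellNF state num (i * num.toNat + j)))

-- the cell A builds at (i, j), with A's own index expression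
def pvCell (state : String) (num : Int) (i j : Nat) : List Int :=
  ((List.range num.toNat).filter (fun (k : Nat) =>
    decide (PySem.Str.pyGet? state ((i : Int) * num * num + (j : Int) * num + (k : Int)) = some '1'))).map
    (fun (k : Nat) => (k : Int))

-- two modifications at the same index compose
theorem pv_modify_modify {α : Type} (m : List α) (i : Nat) (f g : α → α) :
    (m.modify i f).modify i g = m.modify i (fun x => g (f x)) := by
  induction m generalizing i with
  | nil => simp
  | cons a t ih => cases i <;> simp [ih]

-- a conditional mutation is a mutation by a conditional function
theorem pv_ite_modify {α : Type} (c : Prop) [Decidable c] (m : List α) (i : Nat) (f : α → α) :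
    (if c then m.modify i f else m) = m.modify i (fun x => if c then f x else x) := by
  split
  · rfl
  · exact (List.modify_id i m).symm

-- a loop mutating one fixed cell is a single mutation by the folded function
theorem pv_foldl_modify_const {α β : Type} (l : List β) (i : Nat) (F : β → α → α) (m : List α) :
    l.foldl (fun m b => m.modify i (F b)) m
      = m.modify i (fun x => l.foldl (fun x b => F b x) x) := by
  induction l generalizing m with
  | nil => simp only [List.foldl_nil]; exact (List.modify_id i m).symm
  | cons b t ih => simp only [List.foldl_cons, ih, pv_modify_modify]

theorem pv_modify_append {α : Type} (pre suf : List α) (x : α) (f : α → α) :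
    (pre ++ x :: suf).modify pre.length f = pre ++ f x :: suf := by
  induction pre with
  | nil => simp
  | cons a t ih => simp [ih]

-- a loop mutating each index of a suffix once turns the suffix into its image
theorem pv_foldl_range'_modify {α : Type} (h : Nat → α → α) :
    ∀ (m pre : List α),
      (List.range' pre.length m.length 1).foldl (fun acc i => acc.modify i (h i)) (pre ++ m)
        = pre ++ m.mapIdx (fun k x => h (pre.length + k) x) := by
  intro m
  induction m with
  | nil => intro pre; simp
  | cons a t ih =>
    intro pre
    have hr : List.range' pre.length (a :: t).length 1
        = pre.length :: List.range' (pre.length + 1) t.length 1 := by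
      simp [List.range'_succ]
    rw [hr, List.foldl_cons, pv_modify_append]
    have h2 := ih (pre ++ [h pre.length a])
    simp only [List.length_append, List.length_cons, List.length_nil] at h2
    rw [show pre ++ h pre.length a :: t = (pre ++ [h pre.length a]) ++ t by simp]
    rw [h2]
    simp [List.mapIdx_cons, Nat.add_assoc, Nat.add_comm 1]

theorem pv_foldl_range_modify {α : Type} (h : Nat → α → α) (m : List α) :
    (List.range m.length).foldl (fun acc i => acc.modify i (h i)) m = m.mapIdx h := by
  have h2 := pv_foldl_range'_modify h m []
  simpa [List.range_eq_range'] using h2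

-- mapIdx over a constant list is a map over the index range
theorem pv_mapIdx_replicate {α β : Type} (h : Nat → α → β) (x : α) (n : Nat) :
    (List.replicate n x).mapIdx h = (List.range n).map (fun i => h i x) := by
  induction n generalizing h with
  | zero => simp
  | succ n ih => simp [List.replicate_succ, List.mapIdx_cons, List.range_succ_eq_map, ih,
      List.map_map, Function.comp_def]

-- a guarded-add loop over a list builds exactly s.update(filtered image)
theorem pv_foldl_add_filter {β : Type} (l : List β) (c : β → Prop) [DecidablePred c]
    (f : β → Int) (s : PySem.Set Int) :
    l.foldl (fun s b => if c b then PySem.Set.add s (f b) else s) s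
      = PySem.Set.update s ((l.filter (fun b => decide (c b))).map f) := by
  rw [PySem.Set.update_map_eq_foldl_add, List.foldl_filter]
  simp only [decide_eq_true_eq]

theorem pv_pyRange0 (num : Int) :
    PySem.List.pyRange 0 num 1 = (List.range num.toNat).map (fun k => ((k : Nat) : Int)) := by
  rw [PySem.List.pyRange_one]
  simp only [zero_add, Int.sub_zero]

-- the j-loop of A for a fixed i, acting on row i only
def pvRowFun (state : String) (num : Int) (i : Nat) (row : List (List Int)) : List (List Int) :=
  (List.range num.toNat).foldl (fun (row : List (List Int)) (j : Nat) =>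
    row.modify j (fun s => PySem.Set.update s (pvCell state num i j))) row

-- ===== A reduces to the normal form =====
theorem pv_A_eq_NF (state : String) (num : Int) :
    state_to_matrix_set state num = pvNF state num := by
  unfold state_to_matrix_set
  rw [pv_pyRange0]
  simp only [List.foldl_map, List.map_map, Int.toNat_natCast, Function.comp_def]
  -- k-level collapse
  have hK : ∀ (i j : Nat) (m : List (List (List Int))),
      (List.range num.toNat).foldl (fun (m : List (List (List Int))) (k : Nat) =>
        if PySem.Str.pyGet? state ((i : Int) * num * num + (j : Int) * num + (k : Int)) = some '1' then
          m.modify i (fun row => row.modify j (fun s => PySem.Set.add s (k : Int)))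
        else m) m
      = m.modify i (fun row => row.modify j (fun s => PySem.Set.update s (pvCell state num i j))) := by
    intro i j m
    have hstep : (fun (m : List (List (List Int))) (k : Nat) =>
        if PySem.Str.pyGet? state ((i : Int) * num * num + (j : Int) * num + (k : Int)) = some '1' then
          m.modify i (fun row => row.modify j (fun s => PySem.Set.add s (k : Int)))
        else m)
      = (fun (m : List (List (List Int))) (k : Nat) =>
          m.modify i (fun row => row.modify j (fun s =>
            if PySem.Str.pyGet? state ((i : Int) * num * num + (j : Int) * num + (k : Int)) = some '1' then
              PySem.Set.add s (k : Int) else s))) := by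
      funext m k
      rw [pv_ite_modify]
      congr 1
      funext row
      rw [pv_ite_modify]
    rw [hstep, pv_foldl_modify_const]
    congr 1
    funext row
    rw [pv_foldl_modify_const]
    congr 1
    funext s
    rw [pv_foldl_add_filter (List.range num.toNat)
      (fun (k : Nat) => PySem.Str.pyGet? state ((i : Int) * num * num + (j : Int) * num + (k : Int)) = some '1')
      (fun (k : Nat) => (k : Int)) s]
    rfl
  -- j-level collapse
  have hJ : ∀ (i : Nat) (m : List (List (List Int))),
      (List.range num.toNat).foldl (fun (m : List (List (List Int))) (j : Nat) =>
        (List.range num.toNat).foldl (fun (m : List (List (List Int))) (k : Nat) =>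
          if PySem.Str.pyGet? state ((i : Int) * num * num + (j : Int) * num + (k : Int)) = some '1' then
            m.modify i (fun row => row.modify j (fun s => PySem.Set.add s (k : Int)))
          else m) m) m
      = m.modify i (pvRowFun state num i) := by
    intro i m
    rw [show (fun (m : List (List (List Int))) (j : Nat) =>
        (List.range num.toNat).foldl (fun (m : List (List (List Int))) (k : Nat) =>
          if PySem.Str.pyGet? state ((i : Int) * num * num + (j : Int) * num + (k : Int)) = some '1' then
            m.modify i (fun row => row.modify j (fun s => PySem.Set.add s (k : Int)))
          else m) m)
      = (fun (m : List (List (List Int))) (j : Nat) =>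
          m.modify i (fun row => row.modify j (fun s => PySem.Set.update s (pvCell state num i j))))
      from by funext m j; exact hK i j m]
    rw [pv_foldl_modify_const]
    rfl
  -- i-level collapse
  rw [show (fun (m : List (List (List Int))) (i : Nat) =>
      (List.range num.toNat).foldl (fun (m : List (List (List Int))) (j : Nat) =>
        (List.range num.toNat).foldl (fun (m : List (List (List Int))) (k : Nat) =>
          if PySem.Str.pyGet? state ((i : Int) * num * num + (j : Int) * num + (k : Int)) = some '1' then
            m.modify i (fun row => row.modify j (fun s => PySem.Set.add s (k : Int)))
          else m) m) m)
    = (fun (m : List (List (List Int))) (i : Nat) => m.modify i (pvRowFun state num i))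
    from by funext m i; exact hJ i m]
  -- the initial matrix is a replicate of replicates
  rw [show (List.range num.toNat).map (fun _ => (List.range num.toNat).map
        (fun _ => ([] : List Int)))
      = List.replicate num.toNat (List.replicate num.toNat ([] : List Int)) from by
    rw [List.map_const', List.map_const']; simp]
  -- the outer fold turns the replicate into a map over the index range
  have hI := pv_foldl_range_modify (fun i row => pvRowFun state num i row)
    (List.replicate num.toNat (List.replicate num.toNat ([] : List Int)))
  rw [List.length_replicate] at hI
  rw [hI, pv_mapIdx_replicate]
  unfold pvNF
  apply List.map_congr_left
  intro i hi
  -- each row fold turns its replicate row into a map over the index range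
  unfold pvRowFun
  have hR := pv_foldl_range_modify (fun (j : Nat) (s : List Int) =>
      PySem.Set.update s (pvCell state num i j))
    (List.replicate num.toNat ([] : List Int))
  rw [List.length_replicate] at hR
  rw [hR, pv_mapIdx_replicate]
  apply List.map_congr_left
  intro j hj
  rw [PySem.Set.update_nil_left]
  -- the ranges are nonempty, so num is positive and equals its toNat
  rw [List.mem_range] at hi
  have h0 : 0 < num := by
    by_contra hc
    rw [Int.toNat_of_nonpos (not_lt.mp hc)] at hi
    omega
  have hnum : num = (num.toNat : Int) := (Int.toNat_of_nonneg h0.le).symm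
  unfold pvCell pvCellNF
  congr 1
  apply congrArg
  apply List.filter_congr
  intro k hk
  have hidx : ((i : Int) * num * num + (j : Int) * num + (k : Int))
      = ((i * num.toNat + j : Nat) : Int) * num + (k : Int) := by
    rw [hnum]
    simp only [Int.toNat_natCast]
    push_cast
    ring
  rw [hidx]

-- splitting a range into consecutive blocks of size n
theorem pv_range_mul (m n : Nat) :
    List.range (m * n) = (List.range m).flatMap (fun q => List.range' (q * n) n) := by
  induction m with
  | zero => simp
  | succ m ih =>
    rw [Nat.succ_mul, List.range_add, ih, List.range_succ, List.flatMap_append]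
    simp [List.range'_eq_map_range]

-- the cell B builds at flat index q, with B's own index expression
def pvCellB (state : String) (n : Nat) (q : Nat) : List Int :=
  ((List.range n).filter (fun (k : Nat) =>
    decide (PySem.Str.pyGet? state ((q * n + k : Nat) : Int) = some '1'))).map
    (fun (k : Nat) => (k : Int))

-- ===== B reduces to the normal form =====
theorem pv_B_eq_NF (state : String) (num : Int) :
    state_to_matrix_set_alt state num = pvNF state num := by
  simp only [state_to_matrix_set_alt, pvNF]
  by_cases h0 : num ≤ 0
  · rw [if_pos h0, Int.toNat_of_nonpos h0]
    simp
  · rw [if_neg h0]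
    have hpos : 0 < num := not_le.mp h0
    have hnum : num = (num.toNat : Int) := (Int.toNat_of_nonneg hpos.le).symm
    generalize hgen : num.toNat = n at *
    subst hnum
    have hnn : ((n : Int) * (n : Int)) = ((n * n : Nat) : Int) := by push_cast; ring
    rw [hnn]
    have hflat : ((n : Int) * ((n * n : Nat) : Int)) = (((n * n) * n : Nat) : Int) := by
      push_cast; ring
    rw [hflat, pv_pyRange0, pv_pyRange0, pv_pyRange0]
    simp only [Int.toNat_natCast, List.foldl_map, List.map_map, Function.comp_def]
    -- the initial flat cell list is a replicate
    rw [show (List.range (n * n)).map (fun _ => ([] : List Int))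
        = List.replicate (n * n) ([] : List Int) from by
      rw [List.map_const']; simp]
    -- split the flat pass into blocks of size n
    rw [pv_range_mul (n * n) n, List.foldl_flatMap]
    -- each block only mutates its own cell
    have hblock : ∀ (q : Nat) (cells : List (List Int)),
        (List.range' (q * n) n).foldl (fun cells (p : Nat) =>
          if PySem.Str.pyGet? state (p : Int) = some '1' then
            cells.modify (PySem.Int.floordiv (p : Int) (n : Int)).toNat
              (fun s => PySem.Set.add s (PySem.Int.mod (p : Int) (n : Int)))
          else cells) cells
        = cells.modify q (fun s => PySem.Set.update s (pvCellB state n q)) := by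
      intro q cells
      rw [List.range'_eq_map_range, List.foldl_map]
      rw [PySem.List.foldl_congr_mem _ _ (fun (cells : List (List Int)) (k : Nat) =>
        if PySem.Str.pyGet? state ((q * n + k : Nat) : Int) = some '1' then
          cells.modify q (fun s => PySem.Set.add s ((k : Nat) : Int))
        else cells) cells ?_]
      · rw [show (fun (cells : List (List Int)) (k : Nat) =>
            if PySem.Str.pyGet? state ((q * n + k : Nat) : Int) = some '1' then
              cells.modify q (fun s => PySem.Set.add s ((k : Nat) : Int))
            else cells)
          = (fun (cells : List (List Int)) (k : Nat) => cells.modify q (fun s =>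
              if PySem.Str.pyGet? state ((q * n + k : Nat) : Int) = some '1' then
                PySem.Set.add s ((k : Nat) : Int) else s)) from by
          funext cells k
          rw [pv_ite_modify]]
        rw [pv_foldl_modify_const]
        congr 1
        funext s
        rw [pv_foldl_add_filter (List.range n)
          (fun (k : Nat) => PySem.Str.pyGet? state ((q * n + k : Nat) : Int) = some '1')
          (fun (k : Nat) => (k : Int)) s]
        rfl
      · intro cells k hk
        rw [List.mem_range] at hk
        have hdiv : PySem.Int.floordiv ((q * n + k : Nat) : Int) ((n : Nat) : Int)
            = ((q : Nat) : Int) := by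
          rw [PySem.Int.floordiv_natCast]
          congr 1
          rw [Nat.add_comm, Nat.add_mul_div_right _ _ (by omega : 0 < n),
            Nat.div_eq_of_lt hk]
          omega
        have hmod : PySem.Int.mod ((q * n + k : Nat) : Int) ((n : Nat) : Int)
            = ((k : Nat) : Int) := by
          rw [PySem.Int.mod_natCast]
          congr 1
          rw [Nat.add_comm, Nat.add_mul_mod_self_right, Nat.mod_eq_of_lt hk]
        rw [hdiv, hmod]
        simp only [Int.toNat_natCast]
    rw [show (fun (cells : List (List Int)) (q : Nat) =>
        (List.range' (q * n) n).foldl (fun cells (p : Nat) =>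
          if PySem.Str.pyGet? state (p : Int) = some '1' then
            cells.modify (PySem.Int.floordiv (p : Int) (n : Int)).toNat
              (fun s => PySem.Set.add s (PySem.Int.mod (p : Int) (n : Int)))
          else cells) cells)
      = (fun (cells : List (List Int)) (q : Nat) =>
          cells.modify q (fun s => PySem.Set.update s (pvCellB state n q)))
      from by funext cells q; exact hblock q cells]
    -- the flat fold turns the replicate into a map over the flat index range
    have hI := pv_foldl_range_modify (fun (q : Nat) (s : List Int) =>
        PySem.Set.update s (pvCellB state n q))
      (List.replicate (n * n) ([] : List Int))
    rw [List.length_replicate] at hI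
    rw [hI, pv_mapIdx_replicate]
    -- the row regrouping: each slice of the flat map is one row of the normal form
    apply List.map_congr_left
    intro r hr
    rw [List.mem_range] at hr
    have e1 : ((r : Nat) : Int) * (n : Int) = ((r * n : Nat) : Int) := by push_cast; ring
    have e2 : (((r : Nat) : Int) + 1) * (n : Int) = ((r * n : Nat) : Int) + ((n : Nat) : Int) := by
      push_cast; ring
    rw [e1, e2, PySem.List.slice_natCast_add, ← List.map_drop, ← List.map_take]
    have hrn : r * n + n ≤ n * n := by
      have h5 : (r + 1) * n ≤ n * n := Nat.mul_le_mul_right n (Nat.succ_le_of_lt hr)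
      rw [Nat.succ_mul] at h5
      exact h5
    have hdrop : (List.range (n * n)).drop (r * n) = List.range' (r * n) (n * n - r * n) := by
      rw [List.range_eq_range', List.drop_range']
      simp
    have htake : (List.range' (r * n) (n * n - r * n)).take n = List.range' (r * n) n := by
      apply List.take_range'_of_length_ge
      omega
    rw [hdrop, htake, List.range'_eq_map_range, List.map_map]
    apply List.map_congr_left
    intro j hj
    simp only [Function.comp_def]
    rw [PySem.Set.update_nil_left]
    unfold pvCellB pvCellNF
    simp only [Int.toNat_natCast]
    have hfil : ∀ k ∈ List.range n,
        (decide (PySem.Str.pyGet? state (((r * n + j) * n + k : Nat) : Int) = some '1'))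
          = (decide (PySem.Str.pyGet? state
              (((r * n + j : Nat) : Int) * ((n : Nat) : Int) + ((k : Nat) : Int)) = some '1')) := by
      intro k _
      have hidx : (((r * n + j) * n + k : Nat) : Int)
          = ((r * n + j : Nat) : Int) * ((n : Nat) : Int) + ((k : Nat) : Int) := by
        push_cast; ring
      rw [hidx]
    rw [List.filter_congr hfil]

-- ===== VERDICT (by name: the statement is the Claim_ definition above) =====
theorem state_to_matrix_set_spec : Claim_equal_state_to_matrix_set := by
  intro state num _ _
  unfold Spec_state_to_matrix_set
  rw [pv_A_eq_NF, pv_B_eq_NF]
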